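-- pv_equiv track=rewrite | github.com/nunezpaul/practice_problems | course_schedule/determine_course_schedule.py | check_prerequisite
-- ===== SOURCE A (Python) =====
-- def check_prerequisite(course_schedules, prerequisites):
--     course_taken = {}
--     for course in course_schedules:
--         for prerequisite in prerequisites.get(course, []):
--             if prerequisite not in course_taken:
--                 return False
--         course_taken[course] = True
--     return True
-- ===== SOURCE B (Python) =====
-- def check_prerequisite(course_schedules, prerequisites):
--     pos = {}
--     for i, c in enumerate(course_schedules):
--         if c not in pos:
--             pos[c] = i
--     for i, c in enumerate(course_schedules):
--         for p in prerequisites.get(c, []):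
--             if p not in pos or pos[p] >= i:
--                 return False
--     return True
-- ===== Notes on version B (the rewrite author's own statement) =====
-- stated objective: alternative
-- what changed: Replaces the incremental taken-set single pass with a two-pass formulation: first build a first-occurrence index table, then validate every prerequisite by strict index comparison against it.
import Mathlib
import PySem

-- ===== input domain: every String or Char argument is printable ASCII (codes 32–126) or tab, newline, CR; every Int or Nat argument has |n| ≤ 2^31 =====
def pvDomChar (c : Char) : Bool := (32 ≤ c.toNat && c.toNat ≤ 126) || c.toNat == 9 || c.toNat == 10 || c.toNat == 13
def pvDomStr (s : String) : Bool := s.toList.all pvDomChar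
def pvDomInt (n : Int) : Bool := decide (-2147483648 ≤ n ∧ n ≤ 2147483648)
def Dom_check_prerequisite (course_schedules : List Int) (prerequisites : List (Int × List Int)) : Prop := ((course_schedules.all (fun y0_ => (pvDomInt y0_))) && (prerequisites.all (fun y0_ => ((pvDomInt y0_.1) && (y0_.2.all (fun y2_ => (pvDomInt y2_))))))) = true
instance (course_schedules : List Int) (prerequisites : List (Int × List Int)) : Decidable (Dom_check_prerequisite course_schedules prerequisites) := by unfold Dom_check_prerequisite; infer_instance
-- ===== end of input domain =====

-- B replaces A's incremental taken-set single pass with a two-pass form: build a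
-- first-occurrence position table, then validate each prerequisite by strict index
-- comparison (alternative decomposition, same asymptotic cost).


-- ===== PORT A =====
-- single pass: check each course's prerequisites against the taken-dict, then mark the course taken
def aLoop (prerequisites : List (Int × List Int)) (taken : PySem.Dict Int Bool) : List Int → Bool
  | [] => true
  | c :: rest =>
      if ((PySem.Dict.mk prerequisites).getD c []).all (fun p => taken.contains p) then
        aLoop prerequisites (taken.insert c true) rest
      else false

def check_prerequisite (course_schedules : List Int) (prerequisites : List (Int × List Int)) : Bool :=
  aLoop prerequisites PySem.Dict.empty course_schedules

-- ===== PORT B =====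
-- pass 1: first-occurrence position of each course
def bPos (pos : PySem.Dict Int Int) : List (Int × Int) → PySem.Dict Int Int
  | [] => pos
  | (i, c) :: rest => bPos (if pos.contains c then pos else pos.insert c i) rest

-- pass 2: every prerequisite must have a recorded position strictly before the course's index
def bCheck (prerequisites : List (Int × List Int)) (pos : PySem.Dict Int Int) : List (Int × Int) → Bool
  | [] => true
  | (i, c) :: rest =>
      if ((PySem.Dict.mk prerequisites).getD c []).all
           (fun p => match pos.get? p with | some j => decide (j < i) | none => false) then
        bCheck prerequisites pos rest
      else false

def check_prerequisite_alt (course_schedules : List Int) (prerequisites : List (Int × List Int)) : Bool :=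
  bCheck prerequisites (bPos PySem.Dict.empty (PySem.List.enumerate course_schedules 0))
    (PySem.List.enumerate course_schedules 0)

-- ===== PRECONDITION & SPEC =====
def Spec_check_prerequisite (course_schedules : List Int) (prerequisites : List (Int × List Int)) (out : Bool) : Prop := out = check_prerequisite_alt course_schedules prerequisites
instance (course_schedules : List Int) (prerequisites : List (Int × List Int)) (out : Bool) : Decidable (Spec_check_prerequisite course_schedules prerequisites out) := by unfold Spec_check_prerequisite; infer_instance

-- ===== CLAIM (what is proved, stated in full; the proofs are below) =====
def Claim_equal_check_prerequisite : Prop := ∀ (course_schedules : List Int) (prerequisites : List (Int × List Int)), Dom_check_prerequisite course_schedules prerequisites → Spec_check_prerequisite course_schedules prerequisites (check_prerequisite course_schedules prerequisites)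

-- ===== LEMMAS AND PROOFS =====


-- membership in a prefix, phrased through the first-occurrence index
theorem mem_take_iff_idxOf (l : List Int) (p : Int) : ∀ m : Nat, p ∈ l.take m ↔ p ∈ l ∧ l.idxOf p < m := by
  induction l with
  | nil => intro m; simp
  | cons a t ih =>
    intro m
    cases m with
    | zero => simp
    | succ n =>
      by_cases hpa : p = a
      · subst hpa; simp [List.idxOf_cons_self]
      · simp [List.take_succ_cons, hpa, List.idxOf_cons_ne t (Ne.symm hpa), ih n]

theorem all_congr_local {α : Type} (l : List α) (f g : α → Bool) (h : ∀ x ∈ l, f x = g x) :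
    l.all f = l.all g := by
  induction l with
  | nil => rfl
  | cons a t ih => simp only [List.all_cons, h a (by simp), ih (fun x hx => h x (by simp [hx]))]

-- pass 1 records the first-occurrence index of each course
theorem bPos_get (cs : List Int) (p : Int) :
    ∀ (i : Int) (pos : PySem.Dict Int Int),
    (bPos pos (PySem.List.enumerate cs i)).get? p =
      if pos.contains p then pos.get? p
      else if p ∈ cs then some (i + (cs.idxOf p : Int)) else none := by
  induction cs with
  | nil =>
    intro i pos
    by_cases h : pos.contains p
    · simp [PySem.List.enumerate_nil, bPos, h]
    · simp [PySem.List.enumerate_nil, bPos, h,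
        (PySem.Dict.get?_eq_none_iff_contains pos p).2 (Bool.eq_false_iff.mpr h)]
  | cons c rest ih =>
    intro i pos
    rw [PySem.List.enumerate_cons, bPos, ih]
    by_cases hc : pos.contains c
    · simp only [hc, if_true]
      by_cases hp : pos.contains p
      · simp [hp]
      · have hpc : p ≠ c := fun h => hp (h ▸ hc)
        simp only [hp, List.mem_cons, hpc, false_or,
          List.idxOf_cons_ne rest (Ne.symm hpc)]
        by_cases hmem : p ∈ rest
        · simp [hmem]; ring
        · simp [hmem]
    · simp only [hc]
      by_cases hpc : p = c
      · subst hpc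
        simp [PySem.Dict.get?_insert_self, hc, List.idxOf_cons_self]

      · by_cases hp : pos.contains p
        · simp [PySem.Dict.contains_insert, PySem.Dict.get?_insert, hpc, hp]
        · by_cases hmem : p ∈ rest
          · simp [PySem.Dict.contains_insert, hpc, hp, hmem,
              List.idxOf_cons_ne rest (Ne.symm hpc)]
            ring
          · simp [PySem.Dict.contains_insert, hpc, hp, hmem]

-- the two loops agree on any suffix, given the taken-dict/prefix invariant
theorem loops_agree (prereq : List (Int × List Int)) (cs : List Int) :
    ∀ (suf : List Int) (k : Nat) (taken : PySem.Dict Int Bool),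
      cs.drop k = suf →
      (∀ p : Int, taken.contains p = decide (p ∈ cs.take k)) →
      aLoop prereq taken suf =
        bCheck prereq (bPos PySem.Dict.empty (PySem.List.enumerate cs 0))
          (PySem.List.enumerate suf (k : Int)) := by
  intro suf
  induction suf with
  | nil => intro k taken _ _; simp [aLoop, bCheck, PySem.List.enumerate_nil]
  | cons c rest ih =>
    intro k taken hdrop hinv
    have hk : k < cs.length := by
      by_contra h
      rw [List.drop_eq_nil_of_le (by omega)] at hdrop
      exact absurd hdrop (by simp)
    rw [List.drop_eq_getElem_cons hk] at hdrop
    obtain ⟨hck, hdrop'⟩ : cs[k] = c ∧ cs.drop (k+1) = rest := by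
      constructor <;> [exact (List.cons_eq_cons.mp hdrop).1; exact (List.cons_eq_cons.mp hdrop).2]
    have hcond : ∀ p ∈ (PySem.Dict.mk prereq).getD c [],
        taken.contains p =
          (match (bPos PySem.Dict.empty (PySem.List.enumerate cs 0)).get? p with
            | some j => decide (j < (k : Int)) | none => false) := by
      intro p _
      rw [hinv p, bPos_get cs p 0 PySem.Dict.empty]
      simp only [PySem.Dict.contains_empty, Bool.false_eq_true, if_false]
      by_cases hp : p ∈ cs
      · simp only [hp, if_true]
        show decide (p ∈ cs.take k) = decide ((0:Int) + (cs.idxOf p : Int) < (k : Int))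
        simp only [decide_eq_decide, mem_take_iff_idxOf cs p k, hp, true_and]
        omega
      · have h1 : ¬ p ∈ cs.take k := fun hm => hp (List.mem_of_mem_take hm)
        simp [hp, h1]
    have hall := all_congr_local ((PySem.Dict.mk prereq).getD c []) _ _ hcond
    rw [PySem.List.enumerate_cons, aLoop, bCheck, hall]
    by_cases hcnd : ((PySem.Dict.mk prereq).getD c []).all
        (fun p => match (bPos PySem.Dict.empty (PySem.List.enumerate cs 0)).get? p with
          | some j => decide (j < (k : Int)) | none => false)
    · rw [if_pos hcnd, if_pos hcnd]
      have htake : cs.take (k+1) = cs.take k ++ [c] := by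
        rw [List.take_succ_eq_append_getElem hk, hck]
      have : ((k : Int) + 1) = ((k + 1 : Nat) : Int) := by push_cast; ring
      rw [this]
      apply ih (k+1) (taken.insert c true) hdrop'
      intro p
      rw [PySem.Dict.contains_insert, hinv p, htake]
      by_cases hpc : p = c
      · simp [hpc]
      · simp [hpc]
    · rw [if_neg hcnd, if_neg hcnd]

-- ===== VERDICT (by name: the statement is the Claim_ definition above) =====
theorem check_prerequisite_spec : Claim_equal_check_prerequisite := by
  intro cs pr _
  unfold Spec_check_prerequisite check_prerequisite check_prerequisite_alt
  exact loops_agree pr cs cs 0 PySem.Dict.empty (by simp)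
    (by intro p; simp [PySem.Dict.contains_empty])
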